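-- pv_equiv track=rewrite | github.com/umm-dev/Symphony | symphony_alpha.py | _mention_match_quality
-- ===== SOURCE A (Python) =====
-- from typing import Awaitable, Callable, Literal, Optional
--
-- def _mention_match_quality(query: str, fields: tuple[str, ...]) -> Optional[int]:
--     if not query:
--         return 1
--     if any(field == query for field in fields):
--         return 0
--     if any(field.startswith(query) for field in fields):
--         return 1
--     if any(query in field for field in fields):
--         return 2
--     return None
-- ===== SOURCE B (Python) =====
-- def _mention_match_quality(query, fields):
--     if not query:
--         return 1
--     best = None
--     for field in fields:
--         if field == query:
--             return 0
--         q = 1 if field.startswith(query) else (2 if query in field else None)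
--         if q is not None and (best is None or q < best):
--             best = q
--     return best
-- ===== Notes on version B (the rewrite author's own statement) =====
-- stated objective: alternative
-- what changed: Replaced A's four separate any()-passes over fields (one per match tier) with a single loop that computes each field's match quality once and keeps a running minimum, returning 0 immediately on an exact match.
import Mathlib
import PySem

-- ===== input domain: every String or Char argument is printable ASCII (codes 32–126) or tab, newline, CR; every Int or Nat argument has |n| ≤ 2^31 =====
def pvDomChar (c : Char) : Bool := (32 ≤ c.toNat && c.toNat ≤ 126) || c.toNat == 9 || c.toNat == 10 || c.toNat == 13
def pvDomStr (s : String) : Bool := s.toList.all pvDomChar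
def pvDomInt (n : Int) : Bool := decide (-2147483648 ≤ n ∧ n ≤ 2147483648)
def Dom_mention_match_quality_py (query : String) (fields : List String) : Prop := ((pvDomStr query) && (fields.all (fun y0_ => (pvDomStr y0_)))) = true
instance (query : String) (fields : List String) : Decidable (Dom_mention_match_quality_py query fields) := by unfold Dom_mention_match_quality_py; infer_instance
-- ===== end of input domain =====

-- B replaces A's four separate any()-passes by a single loop keeping a running minimum quality; same results, alternative decomposition.

-- ===== PORT A =====
def mention_match_quality_py (query : String) (fields : List String) : Option Int :=
  if query = "" then some 1
  else if fields.any (fun field => field = query) then some 0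
  else if fields.any (fun field => PySem.Str.startswith field query) then some 1
  else if fields.any (fun field => PySem.Str.isIn query field) then some 2
  else none

-- ===== PORT B =====
-- the for-loop of Source B: `best` accumulator, early `return 0` on an exact match
def mmqLoop (query : String) : List String → Option Int → Option Int
  | [], best => best
  | field :: rest, best =>
    if field = query then some 0
    else
      let q : Option Int :=
        if PySem.Str.startswith field query then some 1
        else if PySem.Str.isIn query field then some 2
        else none
      let best' : Option Int :=
        match q, best with
        | some v, none => some v
        | some v, some b => if v < b then some v else some b
        | none, b => b
      mmqLoop query rest best'

def mention_match_quality_py_alt (query : String) (fields : List String) : Option Int :=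
  if query = "" then some 1
  else mmqLoop query fields none

-- ===== PRECONDITION & SPEC =====
def Spec_mention_match_quality_py (query : String) (fields : List String) (out : Option Int) : Prop := out = mention_match_quality_py_alt query fields
instance (query : String) (fields : List String) (out : Option Int) : Decidable (Spec_mention_match_quality_py query fields out) := by unfold Spec_mention_match_quality_py; infer_instance

-- ===== CLAIM (what is proved, stated in full; the proofs are below) =====
def Claim_equal_mention_match_quality_py : Prop := ∀ (query : String) (fields : List String), Dom_mention_match_quality_py query fields → Spec_mention_match_quality_py query fields (mention_match_quality_py query fields)

-- ===== LEMMAS AND PROOFS =====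

-- A's non-empty-query answer, as a function of the field list (proof-side helper)
def mmqTier (query : String) (fields : List String) : Option Int :=
  if fields.any (fun field => field = query) then some 0
  else if fields.any (fun field => PySem.Str.startswith field query) then some 1
  else if fields.any (fun field => PySem.Str.isIn query field) then some 2
  else none

-- min on Option Int with none as +∞
def omin : Option Int → Option Int → Option Int
  | none, b => b
  | a, none => a
  | some x, some y => some (min x y)

-- the quality Source B's loop computes for a single field distinct from query
def fieldQ (query field : String) : Option Int :=
  if PySem.Str.startswith field query then some 1
  else if PySem.Str.isIn query field then some 2
  else none

lemma omin_comm (a b : Option Int) : omin a b = omin b a := by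
  cases a <;> cases b <;> simp [omin, min_comm]

lemma omin_assoc (a b c : Option Int) : omin (omin a b) c = omin a (omin b c) := by
  cases a <;> cases b <;> cases c <;> simp [omin, min_assoc]

lemma if_lt_min (v b : Int) :
    (if v < b then (some v : Option Int) else some b) = some (min v b) := by
  rcases lt_or_ge v b with h | h
  · simp [h, min_eq_left h.le]
  · simp [not_lt.2 h, min_eq_right h]

lemma mmqLoop_cons (query f : String) (rest : List String) (best : Option Int)
    (hf : ¬ f = query) :
    mmqLoop query (f :: rest) best = mmqLoop query rest (omin (fieldQ query f) best) := by
  by_cases hp : PySem.Chars.startswith f.toList query.toList = true <;>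
    by_cases hs : PySem.Chars.isIn query.toList f.toList = true <;>
    cases best <;>
    simp [mmqLoop, fieldQ, omin, hf, hp, hs, if_lt_min]

lemma mmqTier_cons (query f : String) (rest : List String) (hf : ¬ f = query) :
    mmqTier query (f :: rest) = omin (fieldQ query f) (mmqTier query rest) := by
  by_cases hp : PySem.Chars.startswith f.toList query.toList = true <;>
    by_cases hs : PySem.Chars.isIn query.toList f.toList = true <;>
    by_cases he : query ∈ rest <;>
    by_cases h2 : ∃ x ∈ rest, PySem.Chars.startswith x.toList query.toList = true <;>
    by_cases h3 : ∃ x ∈ rest, PySem.Chars.isIn query.toList x.toList = true <;>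
    simp [mmqTier, fieldQ, omin, List.any_cons, hf, hp, hs, he, h2, h3]

lemma omin_small (a b : Option Int)
    (ha : a = none ∨ a = some 1 ∨ a = some 2)
    (hb : b = none ∨ b = some 1 ∨ b = some 2) :
    omin a b = none ∨ omin a b = some 1 ∨ omin a b = some 2 := by
  rcases ha with h | h | h <;> rcases hb with h' | h' | h' <;> subst h <;> subst h' <;>
    simp [omin]

lemma fieldQ_small (query f : String) :
    fieldQ query f = none ∨ fieldQ query f = some 1 ∨ fieldQ query f = some 2 := by
  unfold fieldQ; split_ifs <;> simp

lemma mmqLoop_eq_omin_tier (query : String) (fs : List String) :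
    ∀ best : Option Int, (best = none ∨ best = some 1 ∨ best = some 2) →
      mmqLoop query fs best = omin best (mmqTier query fs) := by
  induction fs with
  | nil => intro best _; cases best <;> simp [mmqLoop, mmqTier, omin]
  | cons f rest ih =>
    intro best hb
    by_cases hf : f = query
    · rcases hb with h | h | h <;>
        simp [mmqLoop, mmqTier, hf, omin, h]
    · rw [mmqLoop_cons query f rest best hf,
         ih _ (omin_small _ _ (fieldQ_small query f) hb),
         mmqTier_cons query f rest hf,
         omin_comm (fieldQ query f) best, omin_assoc]

-- ===== VERDICT (by name: the statement is the Claim_ definition above) =====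
theorem mention_match_quality_py_spec : Claim_equal_mention_match_quality_py := by
  intro query fields _
  unfold Spec_mention_match_quality_py mention_match_quality_py mention_match_quality_py_alt
  by_cases hq : query = ""
  · simp [hq]
  · rw [mmqLoop_eq_omin_tier query fields none (Or.inl rfl)]
    simp [mmqTier, omin, hq]
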